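-- pv_equiv track=rewrite | github.com/MrBrantCode/unitest_baseline | mut_generate/mist_train_cf/cf_73191/solution.py | custom_divisible
-- ===== SOURCE A (Python) =====
-- def custom_divisible(x, y, z, k):
--     """
--     This function accepts four positive integers x, y, z and k as inputs. It finds and returns the kth
--     largest even integer in the range [x, y] inclusive, which is evenly divisible by z. If k such numbers
--     do not exist within the specified range or the range is invalid, the function should return -1.
--     """
--     if x > y:
--         return -1
--
--     divisible_numbers = [num for num in range(x, y + 1) if num % z == 0 and num % 2 == 0]
--
--     if k > len(divisible_numbers):
--         return -1
--     else:
--         divisible_numbers.sort(reverse=True)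
--         return divisible_numbers[k - 1]
-- ===== SOURCE B (Python) =====
-- def custom_divisible(x, y, z, k):
--     # kth largest even multiple of z in [x, y], computed arithmetically in O(1):
--     # even multiples of z are exactly the multiples of L = lcm(|z|, 2).
--     if x > y:
--         return -1
--     L = abs(z) if z % 2 == 0 else 2 * abs(z)
--     hi = y // L                      # largest multiple index: hi*L <= y
--     cnt = hi - (x - 1) // L          # number of multiples of L in [x, y]
--     if k > cnt:
--         return -1
--     return (hi - (k - 1)) * L
-- ===== Notes on version B (the rewrite author's own statement) =====
-- stated objective: faster
-- what changed: Replaced the linear scan-filter-sort over range(x, y+1) by O(1) arithmetic on multiples of L = lcm(|z|, 2): count = y//L - (x-1)//L and the kth largest is (y//L - (k-1))*L.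
-- outside the precondition, e.g. on custom_divisible(2, 10, 2, 0): A returns 2, B returns 12
import Mathlib
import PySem

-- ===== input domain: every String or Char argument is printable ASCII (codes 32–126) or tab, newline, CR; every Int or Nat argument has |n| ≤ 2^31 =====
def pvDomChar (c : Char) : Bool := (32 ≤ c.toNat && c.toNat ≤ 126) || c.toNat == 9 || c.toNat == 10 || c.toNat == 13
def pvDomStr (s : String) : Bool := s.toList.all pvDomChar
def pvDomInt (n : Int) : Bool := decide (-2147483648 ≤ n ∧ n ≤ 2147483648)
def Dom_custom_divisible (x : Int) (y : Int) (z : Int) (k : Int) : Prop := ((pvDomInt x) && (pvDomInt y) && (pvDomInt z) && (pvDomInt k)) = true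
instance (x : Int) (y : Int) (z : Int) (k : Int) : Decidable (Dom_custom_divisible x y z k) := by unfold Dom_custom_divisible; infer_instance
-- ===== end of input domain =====

-- B replaces A's linear scan-filter-sort of range(x, y+1) by O(1) arithmetic on
-- multiples of L = lcm(|z|, 2) (count and kth-largest computed directly).

-- ===== PORT A =====
def custom_divisible (x : Int) (y : Int) (z : Int) (k : Int) : Int :=
  if x > y then -1
  else
    let nums := (PySem.List.pyRange x (y + 1) 1).filter
      (fun n => PySem.Int.mod n z == 0 && PySem.Int.mod n 2 == 0)
    if k > (nums.length : Int) then -1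
    else (PySem.List.pyGet? (PySem.List.sorted nums (fun v => v) true) (k - 1)).getD 0

-- ===== PORT B =====
def custom_divisible_alt (x : Int) (y : Int) (z : Int) (k : Int) : Int :=
  if x > y then -1
  else
    let L : Int := if PySem.Int.mod z 2 == 0 then |z| else 2 * |z|
    let hi := PySem.Int.floordiv y L
    let cnt := hi - PySem.Int.floordiv (x - 1) L
    if k > cnt then -1 else (hi - (k - 1)) * L

-- ===== PRECONDITION & SPEC =====
-- For a non-empty range x ≤ y, Pre_ excludes z = 0, where A raises ZeroDivisionError (B
-- raises too), and k ≤ 0, which lies outside the documented domain ("accepts four positive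
-- integers"): there A's negative-index wraparound returns an accidental list element or
-- raises IndexError. (For x > y both return -1 for any z, k, so nothing is excluded.)
def Pre_custom_divisible (x : Int) (y : Int) (z : Int) (k : Int) : Prop :=
  y < x ∨ (z ≠ 0 ∧ 1 ≤ k)
instance (x : Int) (y : Int) (z : Int) (k : Int) : Decidable (Pre_custom_divisible x y z k) := by
  unfold Pre_custom_divisible; infer_instance

def pvWitness_custom_divisible : Int × Int × Int × Int := (1, 10, 2, 1)

def Spec_custom_divisible (x : Int) (y : Int) (z : Int) (k : Int) (out : Int) : Prop := out = custom_divisible_alt x y z k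
instance (x : Int) (y : Int) (z : Int) (k : Int) (out : Int) : Decidable (Spec_custom_divisible x y z k out) := by unfold Spec_custom_divisible; infer_instance

-- ===== CLAIM (what is proved, stated in full; the proofs are below) =====
def Claim_equal_custom_divisible : Prop := ∀ (x : Int) (y : Int) (z : Int) (k : Int), Dom_custom_divisible x y z k → Pre_custom_divisible x y z k → Spec_custom_divisible x y z k (custom_divisible x y z k)

-- ===== LEMMAS AND PROOFS =====

-- uniqueness of Euclidean division by a positive divisor
lemma pv_ediv_exact (a b q r : Int) (hb : 0 < b) (h : 0 ≤ r) (h2 : r < b) (h3 : a = b*q + r) : a / b = q := by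
  have h4 : a = r + b * q := by omega
  rw [h4, Int.add_mul_ediv_left r q (by omega), Int.ediv_eq_zero_of_lt h h2, zero_add]

-- moving the numerator down by one drops the quotient exactly at multiples
lemma pv_ediv_pred (L y : Int) (hL : 0 < L) :
    y / L = (y - 1) / L + (if L ∣ y then 1 else 0) := by
  have hq := Int.mul_ediv_add_emod y L
  have hr0 : 0 ≤ y % L := Int.emod_nonneg y (by omega)
  have hrL : y % L < L := Int.emod_lt_of_pos y hL
  by_cases hd : L ∣ y
  · have hr : y % L = 0 := Int.emod_eq_zero_of_dvd hd
    have : (y - 1) / L = y / L - 1 :=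
      pv_ediv_exact (y-1) L (y / L - 1) (L - 1) hL (by omega) (by omega) (by nlinarith [hq])
    simp [hd, this]
  · have hr : y % L ≠ 0 := fun h => hd (Int.dvd_of_emod_eq_zero h)
    have : (y - 1) / L = y / L :=
      pv_ediv_exact (y-1) L (y / L) (y % L - 1) hL (by omega) (by omega) (by omega)
    simp [hd, this]

-- the filtered range is exactly the ascending list of multiples of L in [x, y]
lemma pv_filt (L : Int) (hL : 0 < L) (P : Int → Bool) (hP : ∀ n, P n = true ↔ L ∣ n)
    (y : Int) : ∀ (n : Nat) (x : Int), (y + 1 - x).toNat ≤ n →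
    (PySem.List.pyRange x (y + 1) 1).filter P
      = (PySem.List.pyRange ((x - 1) / L + 1) (y / L + 1) 1).map (fun t => t * L) := by
  intro n
  induction n with
  | zero =>
    intro x hx
    have hxy : y + 1 ≤ x := by omega
    rw [PySem.List.pyRange_one_eq_nil hxy,
        PySem.List.pyRange_one_eq_nil (by have := Int.ediv_le_ediv hL (show y ≤ x - 1 by omega); omega)]
    simp
  | succ n ih =>
    intro x hx
    by_cases hxy : y + 1 ≤ x
    · rw [PySem.List.pyRange_one_eq_nil hxy,
          PySem.List.pyRange_one_eq_nil (by have := Int.ediv_le_ediv hL (show y ≤ x - 1 by omega); omega)]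
      simp
    · have hxy' : x ≤ y := by omega
      rw [PySem.List.pyRange_one_cons (by omega), List.filter_cons]
      have step := pv_ediv_pred L x hL
      have hmono : x / L ≤ y / L := Int.ediv_le_ediv hL hxy'
      rw [ih (x + 1) (by omega)]
      by_cases hd : L ∣ x
      · have hPx : P x = true := (hP x).mpr hd
        have hx2 : x / L = (x - 1) / L + 1 := by simp [hd] at step; omega
        have hmul : (x / L) * L = x := Int.ediv_mul_cancel hd
        rw [hPx]
        rw [show (x + 1 - 1) / L + 1 = x / L + 1 by ring_nf]
        rw [PySem.List.pyRange_one_cons (a := (x-1)/L + 1) (by omega)]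
        simp only [List.map_cons]
        rw [show (x-1)/L + 1 = x / L by omega, hmul]
        rfl
      · have hPx : P x = false := by
          cases h : P x
          · rfl
          · exact absurd ((hP x).mp h) hd
        have hx2 : x / L = (x - 1) / L := by simp [hd] at step; omega
        rw [hPx]
        simp only [Bool.false_eq_true, if_false]
        rw [show (x + 1 - 1) / L + 1 = x / L + 1 by ring_nf, hx2]

lemma pv_L_pos (z : Int) (hz : z ≠ 0) :
    0 < (if PySem.Int.mod z 2 == 0 then |z| else 2 * |z|) := by
  have : 0 < |z| := abs_pos.mpr hz
  split <;> omega

-- A's filter condition is divisibility by L = lcm(|z|, 2)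
lemma pv_cond (z : Int) (n : Int) :
    (PySem.Int.mod n z == 0 && PySem.Int.mod n 2 == 0) = true
      ↔ (if PySem.Int.mod z 2 == 0 then |z| else 2 * |z|) ∣ n := by
  have h1 : (PySem.Int.mod n z == 0) = true ↔ z ∣ n := by
    rw [beq_iff_eq]; exact PySem.Int.mod_eq_zero_iff_dvd n z
  have h2 : (PySem.Int.mod n 2 == 0) = true ↔ (2:Int) ∣ n := by
    rw [beq_iff_eq]; exact PySem.Int.mod_eq_zero_iff_dvd n 2
  have hz2 : (PySem.Int.mod z 2 == 0) = true ↔ (2:Int) ∣ z := by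
    rw [beq_iff_eq]; exact PySem.Int.mod_eq_zero_iff_dvd z 2
  rw [Bool.and_eq_true, h1, h2]
  by_cases he : (2:Int) ∣ z
  · rw [if_pos (hz2.mpr he)]
    constructor
    · rintro ⟨hzd, -⟩; exact (abs_dvd z n).mpr hzd
    · intro h
      have hzd : z ∣ n := (abs_dvd z n).mp h
      exact ⟨hzd, dvd_trans he hzd⟩
  · rw [if_neg (fun h => he (hz2.mp h))]
    constructor
    · rintro ⟨hzd, h2d⟩
      rcases hzd with ⟨m, rfl⟩
      have h2m : (2:Int) ∣ m := ((Int.prime_two.dvd_mul).mp h2d).resolve_left he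
      rcases h2m with ⟨m', rfl⟩
      rcases abs_cases z with ⟨ha, -⟩ | ⟨ha, -⟩
      · exact ⟨m', by rw [ha]; ring⟩
      · exact ⟨-m', by rw [ha]; ring⟩
    · intro h
      have hza : |z| ∣ n := dvd_trans (Dvd.intro 2 (mul_comm 2 |z| ▸ rfl)) h
      exact ⟨(abs_dvd z n).mp hza, dvd_trans ⟨|z|, rfl⟩ h⟩

-- ===== VERDICT (by name: the statement is the Claim_ definition above) =====
theorem custom_divisible_spec : Claim_equal_custom_divisible := by
  intro x y z k _ hpre
  unfold Spec_custom_divisible custom_divisible custom_divisible_alt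
  by_cases hxy : x > y
  · simp [hxy]
  · have hxy' : x ≤ y := by omega
    obtain ⟨hz, hk⟩ := hpre.resolve_left (by omega)
    simp only [if_neg hxy]
    have hL : 0 < (if PySem.Int.mod z 2 == 0 then |z| else 2 * |z|) := pv_L_pos z hz
    generalize hLdef : (if PySem.Int.mod z 2 == 0 then |z| else 2 * |z|) = L at *
    have hfd_y : PySem.Int.floordiv y L = y / L := PySem.Int.floordiv_eq_ediv_of_pos hL
    have hfd_x : PySem.Int.floordiv (x-1) L = (x-1) / L := PySem.Int.floordiv_eq_ediv_of_pos hL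
    have hnums := pv_filt L hL _ (fun n => hLdef ▸ pv_cond z n) y (y + 1 - x).toNat x le_rfl
    rw [hnums, hfd_y, hfd_x]
    have hmono : (x - 1) / L ≤ y / L := Int.ediv_le_ediv hL (by omega)
    have hlen : ((((PySem.List.pyRange ((x-1)/L + 1) (y/L + 1) 1).map (fun t => t * L)).length : Int))
        = y / L - (x - 1) / L := by
      rw [List.length_map, PySem.List.length_pyRange_one]; omega
    rw [hlen]
    by_cases hkc : k > y / L - (x - 1) / L
    · rw [if_pos hkc, if_pos hkc]
    · rw [if_neg hkc, if_neg hkc]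
      -- the filtered list is strictly increasing, so reverse-sorting it reverses it
      have hpair : ((PySem.List.pyRange ((x-1)/L + 1) (y/L + 1) 1).map (fun t => t * L)).Pairwise (· < ·) :=
        List.Pairwise.map _ (fun a b h => mul_lt_mul_of_pos_right h hL)
          (PySem.List.pairwise_lt_pyRange_one ((x-1)/L + 1) (y/L + 1))
      have hsorted : PySem.List.sorted ((PySem.List.pyRange ((x-1)/L + 1) (y/L + 1) 1).map (fun t => t * L)) (fun v => v) true
          = ((PySem.List.pyRange ((x-1)/L + 1) (y/L + 1) 1).map (fun t => t * L)).reverse := by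
        apply PySem.List.sorted_rev_eq_of_perm_of_pairwise_gt
        · exact List.reverse_perm _
        · exact (List.pairwise_reverse).mpr hpair
      rw [hsorted, ← List.map_reverse]
      have h1 := PySem.List.pyRange_neg_one_eq_reverse (y/L) ((x-1)/L)
      rw [← h1, PySem.List.pyRange_neg_one, List.map_map]
      have hk1 : (0:Int) ≤ k - 1 := by omega
      rw [PySem.List.pyGet?_of_nonneg _ hk1]
      have hidx : (k - 1).toNat < (y/L - (x-1)/L).toNat := by omega
      rw [List.getElem?_map, List.getElem?_range hidx]
      simp only [Option.map_some, Option.getD_some, Function.comp_apply]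
      have : ((k - 1).toNat : Int) = k - 1 := Int.toNat_of_nonneg hk1
      rw [this]
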